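-- pv_equiv track=rewrite | github.com/ozan/solutions | rosalind/ba9e.py | all_substrings
-- ===== SOURCE A (Python) =====
-- def all_substrings(tree, s):
--     """
--     Generate all possible substrings of the given suffix tree, depth first
--     """
--     stack = [(0, '')]
--     while stack:
--         node, sub = stack.pop()
--         yield sub
--         for k, v in tree[node].items():
--             start, length = k
--             stack.append((v, sub + s[start:start+length]))
-- ===== SOURCE B (Python) =====
-- def all_substrings(tree, s):
--     """
--     Generate all possible substrings of the given suffix tree, depth first
--     """
--     def _walk(node, sub):
--         yield sub
--         for (start, length), v in reversed(tree[node].items()):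
--             yield from _walk(v, sub + s[start:start+length])
--     yield from _walk(0, '')
-- ===== Notes on version B (the rewrite author's own statement) =====
-- stated objective: simpler
-- what changed: Replaces the explicit LIFO work-stack loop with a recursive generator that yields the node's path string and then recurses into the edges in reversed dict order (exactly the order the LIFO stack pops them); Pre_ excludes inputs where A raises KeyError or never terminates (a node reachable from the root that is not a key of the tree, or a reachable cycle) and association lists with duplicate node keys or duplicate (start,length) edge keys on a reachable node, which do not correspond to a single Python dict.
import Mathlib
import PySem

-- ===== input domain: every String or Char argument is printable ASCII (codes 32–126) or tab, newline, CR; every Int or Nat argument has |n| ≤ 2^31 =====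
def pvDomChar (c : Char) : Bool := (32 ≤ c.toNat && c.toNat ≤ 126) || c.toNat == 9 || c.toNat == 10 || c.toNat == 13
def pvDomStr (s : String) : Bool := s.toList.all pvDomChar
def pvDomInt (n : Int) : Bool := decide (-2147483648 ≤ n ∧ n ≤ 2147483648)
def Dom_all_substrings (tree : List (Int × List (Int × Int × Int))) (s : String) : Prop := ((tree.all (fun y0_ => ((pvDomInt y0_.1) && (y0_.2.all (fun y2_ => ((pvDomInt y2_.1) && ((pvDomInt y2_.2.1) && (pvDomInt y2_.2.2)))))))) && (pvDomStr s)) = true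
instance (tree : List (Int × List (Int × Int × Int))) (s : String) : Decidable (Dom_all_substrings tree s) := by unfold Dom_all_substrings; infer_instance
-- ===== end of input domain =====

-- B replaces A's explicit LIFO work-stack loop by a recursive generator over the tree
-- (children visited in reversed dict order, i.e. exactly the stack's pop order): simpler, same cost.


-- ===== PORT A =====
-- tree[node].items(); a missing key is Python's KeyError, excluded by Pre_ (the [] default is never reached inside Pre_)
def pvEdges (tree : List (Int × List (Int × Int × Int))) (node : Int) : List (Int × Int × Int) :=
  ((PySem.Dict.mk tree).get? node).getD []

-- fuel for the totality guard of both loops: under Pre_ the number of pops/yields is at most the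
-- number of root paths of the (acyclic) reachable subgraph, which this over-counts generously
def pvFuel (tree : List (Int × List (Int × Int × Int))) : Nat :=
  (tree.foldl (fun a p => a + p.2.length) 0 + 2) ^ (tree.length + 2)

-- the while-loop; the stack is kept top-first (Python's append/pop work at the end), so each
-- stack.append of the inner for-loop is one cons, i.e. a foldl of cons over the edge list
def pvLoopA (tree : List (Int × List (Int × Int × Int))) (s : String) :
    Nat → List (Int × String) → List String
  | 0, _ => []
  | _ + 1, [] => []
  | f + 1, (node, sub) :: rest =>
      sub :: pvLoopA tree s f
        ((pvEdges tree node).foldl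
          (fun st e => (e.2.2, sub ++ PySem.Str.slice s (some e.1) (some (e.1 + e.2.1))) :: st) rest)

def all_substrings (tree : List (Int × List (Int × Int × Int))) (s : String) : List String :=
  pvLoopA tree s (pvFuel tree) [((0 : Int), "")]

-- ===== PORT B =====
-- _walk(node, sub): yield sub, then recurse into reversed(tree[node].items()); the fuel (one unit
-- per yield, threaded through and returned) is only a totality guard, never exhausted inside Pre_
mutual
def pvWalk (tree : List (Int × List (Int × Int × Int))) (s : String) :
    (f : Nat) → Int → String → List String × {g : Nat // g ≤ f}
  | 0, _, _ => ([], ⟨0, Nat.le_refl 0⟩)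
  | f + 1, node, sub =>
      match pvKids tree s f ((pvEdges tree node).reverse) sub with
      | (o, ⟨g, hg⟩) => (sub :: o, ⟨g, Nat.le_succ_of_le hg⟩)
termination_by f _ _ => (f, 0)
decreasing_by
  exact Prod.Lex.left _ _ (Nat.lt_succ_self f)

def pvKids (tree : List (Int × List (Int × Int × Int))) (s : String) :
    (f : Nat) → List (Int × Int × Int) → String → List String × {g : Nat // g ≤ f}
  | f, [], _ => ([], ⟨f, Nat.le_refl f⟩)
  | f, e :: rest, sub =>
      match pvWalk tree s f e.2.2 (sub ++ PySem.Str.slice s (some e.1) (some (e.1 + e.2.1))) with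
      | (o1, ⟨f1, hf1⟩) =>
        match pvKids tree s f1 rest sub with
        | (o2, ⟨f2, hf2⟩) => (o1 ++ o2, ⟨f2, Nat.le_trans hf2 hf1⟩)
termination_by f es _ => (f, es.length + 1)
decreasing_by
  · exact Prod.Lex.right f (Nat.succ_pos _)
  · rcases Nat.lt_or_ge f1 f with h | h
    · exact Prod.Lex.left _ _ h
    · have : f1 = f := Nat.le_antisymm hf1 h
      subst this
      exact Prod.Lex.right f1 (Nat.lt_succ_self _)
end

def all_substrings_alt (tree : List (Int × List (Int × Int × Int))) (s : String) : List String :=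
  (pvWalk tree s (pvFuel tree) 0 "").1

-- ===== PRECONDITION & SPEC =====
-- helpers for Pre_: the set of nodes the DFS ever pops, as an iterated closure from the root
def pvKeys (tree : List (Int × List (Int × Int × Int))) : List Int := tree.map Prod.fst
def pvTargets (tree : List (Int × List (Int × Int × Int))) (n : Int) : List Int :=
  (pvEdges tree n).map (fun e => e.2.2)
def pvStepR (tree : List (Int × List (Int × Int × Int))) (S : List Int) : List Int :=
  PySem.List.dedup (S ++ S.flatMap (pvTargets tree))
def pvReach (tree : List (Int × List (Int × Int × Int))) (seed : List Int) : List Int :=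
  (pvStepR tree)^[tree.length + 1] seed

-- Pre_ = exactly the inputs where the Python A returns: every node reachable from the root is a key
-- of the tree and lies on no reachable cycle (else A raises KeyError or loops forever); it also
-- excludes association lists with duplicate node keys, or duplicate (start, length) edge keys on a
-- reachable node, which do not correspond to a single Python dict (A returns the collapsed dict's
-- answer there and B agrees with it).
def Pre_all_substrings (tree : List (Int × List (Int × Int × Int))) (s : String) : Prop :=
  (0 : Int) ∈ pvKeys tree ∧ (pvKeys tree).Nodup ∧
  ∀ n ∈ pvReach tree [0],
    n ∈ pvKeys tree ∧
    ((pvEdges tree n).map (fun e => (e.1, e.2.1))).Nodup ∧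
    n ∉ pvReach tree (pvTargets tree n)

instance (tree : List (Int × List (Int × Int × Int))) (s : String) : Decidable (Pre_all_substrings tree s) := by
  unfold Pre_all_substrings; infer_instance

def pvWitness_all_substrings : (List (Int × List (Int × Int × Int))) × String :=
  ([(0, [(0, 2, 1), (2, 1, 2)]), (1, []), (2, [(0, 1, 3)]), (3, [])], "abc")

def Spec_all_substrings (tree : List (Int × List (Int × Int × Int))) (s : String) (out : List String) : Prop := out = all_substrings_alt tree s
instance (tree : List (Int × List (Int × Int × Int))) (s : String) (out : List String) : Decidable (Spec_all_substrings tree s out) := by unfold Spec_all_substrings; infer_instance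

-- ===== CLAIM (what is proved, stated in full; the proofs are below) =====
def Claim_equal_all_substrings : Prop := ∀ (tree : List (Int × List (Int × Int × Int))) (s : String), Dom_all_substrings tree s → Pre_all_substrings tree s → Spec_all_substrings tree s (all_substrings tree s)

-- ===== LEMMAS AND PROOFS =====
-- running pvWalk over a whole work list, threading the fuel left-to-right
def pvRun (tree : List (Int × List (Int × Int × Int))) (s : String) :
    Nat → List (Int × String) → List String × Nat
  | f, [] => ([], f)
  | f, (n, sub) :: rest =>
      let r := pvWalk tree s f n sub
      let r2 := pvRun tree s r.2.1 rest
      (r.1 ++ r2.1, r2.2)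

theorem pvRun_zero (tree : List (Int × List (Int × Int × Int))) (s : String)
    (l : List (Int × String)) : pvRun tree s 0 l = ([], 0) := by
  induction l with
  | nil => rfl
  | cons x rest ih =>
      obtain ⟨n, sub⟩ := x
      simp [pvRun, pvWalk, ih]

theorem pvRun_append (tree : List (Int × List (Int × Int × Int))) (s : String)
    (xs ys : List (Int × String)) : ∀ f,
    pvRun tree s f (xs ++ ys) =
      ((pvRun tree s f xs).1 ++ (pvRun tree s (pvRun tree s f xs).2 ys).1,
       (pvRun tree s (pvRun tree s f xs).2 ys).2) := by
  induction xs with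
  | nil => intro f; simp [pvRun]
  | cons x rest ih =>
      intro f
      obtain ⟨n, sub⟩ := x
      simp [pvRun, ih, List.append_assoc]

-- pvKids is pvRun over the list of child work items
theorem pvKids_eq_run (tree : List (Int × List (Int × Int × Int))) (s : String)
    (es : List (Int × Int × Int)) (sub : String) : ∀ f,
    ((pvKids tree s f es sub).1, (pvKids tree s f es sub).2.1) =
      pvRun tree s f (es.map
        (fun e => (e.2.2, sub ++ PySem.Str.slice s (some e.1) (some (e.1 + e.2.1))))) := by
  induction es with
  | nil => intro f; simp [pvKids, pvRun]
  | cons e rest ih =>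
      intro f
      have h := ih (pvWalk tree s f e.2.2
        (sub ++ PySem.Str.slice s (some e.1) (some (e.1 + e.2.1)))).2.1
      simp only [pvKids]
      cases hw : pvWalk tree s f e.2.2 (sub ++ PySem.Str.slice s (some e.1) (some (e.1 + e.2.1))) with
      | mk o1 g1 =>
        obtain ⟨f1, hf1⟩ := g1
        cases hk : pvKids tree s f1 rest sub with
        | mk o2 g2 =>
          obtain ⟨f2, hf2⟩ := g2
          have h' := ih f1
          rw [hk] at h'
          simp only [hw] at h
          simp only [List.map_cons]
          simp [pvRun, hw, ← h']

-- the stack push loop: foldl of cons is the reversed mapped list in front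
theorem pvFoldl_cons (c : (Int × Int × Int) → Int × String)
    (es : List (Int × Int × Int)) : ∀ st : List (Int × String),
    es.foldl (fun st e => c e :: st) st = (es.map c).reverse ++ st := by
  induction es with
  | nil => intro st; simp
  | cons e rest ih => intro st; simp [List.foldl_cons, ih]

-- the main bridge: the stack loop computes pvRun of the stack, for EVERY fuel value
theorem pvLoopA_eq_run (tree : List (Int × List (Int × Int × Int))) (s : String) :
    ∀ (f : Nat) (stack : List (Int × String)),
    pvLoopA tree s f stack = (pvRun tree s f stack).1 := by
  intro f
  induction f with
  | zero => intro stack; rw [pvRun_zero]; rfl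
  | succ f ih =>
      intro stack
      cases stack with
      | nil => rfl
      | cons x rest =>
          obtain ⟨node, sub⟩ := x
          simp only [pvLoopA]
          rw [pvFoldl_cons, ih, pvRun_append]
          simp only [pvRun]
          cases hw : pvWalk tree s (f + 1) node sub with
          | mk o g =>
            obtain ⟨fg, hfg⟩ := g
            have hkr := pvKids_eq_run tree s (pvEdges tree node).reverse sub f
            simp only [pvWalk] at hw
            cases hk : pvKids tree s f ((pvEdges tree node).reverse) sub with
            | mk o2 g2 =>
              obtain ⟨f2, hf2⟩ := g2
              rw [hk] at hw hkr
              cases hw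
              simp only at hkr
              rw [List.map_reverse] at hkr
              have hkr1 := congrArg Prod.fst hkr
              have hkr2 := congrArg Prod.snd hkr
              simp only at hkr1 hkr2
              rw [← hkr1, ← hkr2]
              simp

-- ===== VERDICT =====
theorem all_substrings_spec : Claim_equal_all_substrings := by
  intro tree s _ _
  unfold Spec_all_substrings all_substrings all_substrings_alt
  rw [pvLoopA_eq_run]
  simp [pvRun]
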